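-- pv_equiv track=rewrite | github.com/chuoer47/AlgorithmLearning | 刷题记录/LeetCode/周赛/第161场双周赛/位计数深度为 K 的整数数目 I.py | popcountDepth
-- ===== SOURCE A (Python) =====
-- from functools import cache
--
-- S = [{1}]
--
-- def popcountDepth(n: int, k: int) -> int:
--     if k == 0:
--         return 1 if n >= 1 else 0
--
--     mx = len(bin(n)[2:])
--     A = {x for x in S[k - 1] if x <= mx}
--     if not A:
--         return 0
--
--     s = bin(n)[2:]
--     m = len(s)
--     max_A = max(A) if A else 0
--
--     @cache
--     def dfs(i, cnt, is_limit):
--         # 数位DP模板：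
--         # i为位置；cnt为1的数量；is_limit表示前面是否一致
--         if i == m:
--             return int(cnt in A)
--         up = int(s[i]) if is_limit else 1
--         ans = 0
--         for d in range(0, up + 1):
--             if cnt + d > max_A:
--                 # 剪枝
--                 continue
--             ans += dfs(i + 1, cnt + d, is_limit and (d == up))
--         return ans
--
--     ans = dfs(0, 0, True) - int(1 in A)
--     dfs.cache_clear()
--     return ans
-- ===== SOURCE B (Python) =====
-- S = [{1}]
--
-- def _comb(n, r):
--     c = 1
--     for i in range(r):
--         c = c * (n - i) // (i + 1)
--     return c
--
-- def popcountDepth(n: int, k: int) -> int: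
--     if k == 0:
--         return 1 if n >= 1 else 0
--
--     mx = len(bin(n)[2:])
--     A = {x for x in S[k - 1] if x <= mx}
--     if not A:
--         return 0
--
--     # combinatorial scan instead of the memoized digit DP:
--     # count x in [0, n] with popcount(x) in A, bit by bit
--     bits = bin(n)[2:]
--     m = len(bits)
--     total = 0
--     ones = 0
--     for i, c in enumerate(bits):
--         if c == '1':
--             rem = m - i - 1
--             total += sum(_comb(rem, a - ones) for a in A if 0 <= a - ones <= rem)
--             ones += 1
--     if ones in A:
--         total += 1
--     return total - int(1 in A)
-- ===== Notes on version B (the rewrite author's own statement) =====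
-- stated objective: alternative
-- what changed: Replaces the memoized digit-DP recursion (dfs over position/count/limit states) with a single left-to-right combinatorial scan of the bits that adds a binomial coefficient at each set bit.
import Mathlib
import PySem

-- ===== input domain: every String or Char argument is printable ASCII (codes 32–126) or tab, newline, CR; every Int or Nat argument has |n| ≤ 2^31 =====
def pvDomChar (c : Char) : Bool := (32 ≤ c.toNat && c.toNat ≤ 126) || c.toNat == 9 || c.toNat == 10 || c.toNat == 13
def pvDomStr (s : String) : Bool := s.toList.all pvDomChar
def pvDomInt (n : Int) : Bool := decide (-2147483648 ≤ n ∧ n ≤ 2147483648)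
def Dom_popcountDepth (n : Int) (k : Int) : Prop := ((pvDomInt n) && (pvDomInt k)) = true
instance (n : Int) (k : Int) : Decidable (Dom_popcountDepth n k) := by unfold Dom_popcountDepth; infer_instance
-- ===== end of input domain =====

-- B replaces A's memoized digit DP with a single left-to-right combinatorial scan of the
-- bits (binomial counts at each set bit); same return value on every input A returns on.

-- ===== PORT A =====
-- shared helper: bin(n)[2:] as a list of bits, MSB first; exact for n ≥ 0 (Pre_ ensures n ≥ 0
-- whenever the binary string is reached; Python raises on negative n there).
def pvBin (n : Int) : List Bool := (Nat.toDigits 2 n.toNat).map (fun c => c = '1')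

-- S = [{1}]
def pvS : List (List Int) := [[1]]

-- the @cache'd dfs, as plain recursion over the remaining bits (the cache only memoizes)
def pvDfs (s : List Bool) (A : List Int) (maxA : Int) (cnt : Int) (limit : Bool) : Int :=
  match s with
  | [] => if A.contains cnt then 1 else 0
  | b :: t =>
    let up : Int := if limit then (if b then 1 else 0) else 1
    (PySem.List.pyRange 0 (up + 1) 1).foldl
      (fun ans d =>
        if cnt + d > maxA then ans
        else ans + pvDfs t A maxA (cnt + d) (limit && decide (d = up))) 0

def popcountDepth (n : Int) (k : Int) : Int :=
  if k = 0 then (if n ≥ 1 then 1 else 0)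
  else
    match PySem.List.pyGet? pvS (k - 1) with
    | none => 0  -- Python raises IndexError here; excluded by Pre_
    | some sk =>
      let mx : Int := (pvBin n).length
      let A := sk.filter (fun x => decide (x ≤ mx))
      if A = [] then 0
      else
        let s := pvBin n
        let maxA := (PySem.List.max? A (fun x => x)).getD 0
        pvDfs s A maxA 0 true - (if A.contains 1 then 1 else 0)

-- ===== PORT B =====
-- _comb(n, r): c = 1; for i in range(r): c = c*(n-i)//(i+1)
def pvComb (n : Int) (r : Int) : Int :=
  (PySem.List.pyRange 0 r 1).foldl (fun c i => PySem.Int.floordiv (c * (n - i)) (i + 1)) 1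

-- the scan loop over enumerate(bits) with accumulators total/ones, plus the two trailing steps
def pvScan (s : List Bool) (A : List Int) (ones : Int) (total : Int) : Int :=
  match s with
  | [] =>
    (if A.contains ones then total + 1 else total) - (if A.contains 1 then 1 else 0)
  | true :: t =>
    let rem : Int := (t.length : Int)
    let add := ((A.filter (fun a => decide (0 ≤ a - ones) && decide (a - ones ≤ rem))).map
      (fun a => pvComb rem (a - ones))).foldl (· + ·) 0
    pvScan t A (ones + 1) (total + add)
  | false :: t => pvScan t A ones total

def popcountDepth_alt (n : Int) (k : Int) : Int :=
  if k = 0 then (if n ≥ 1 then 1 else 0)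
  else
    match PySem.List.pyGet? pvS (k - 1) with
    | none => 0  -- Python raises IndexError here; excluded by Pre_
    | some sk =>
      let mx : Int := (pvBin n).length
      let A := sk.filter (fun x => decide (x ≤ mx))
      if A = [] then 0
      else pvScan (pvBin n) A 0 0

-- ===== PRECONDITION & SPEC =====
-- Pre_ excludes exactly the inputs where A raises: k ∉ {0, 1} (S[k-1] is an IndexError since
-- S has one element) and k = 1 with n < 0 (int('b') on bin(n)[2:] is a ValueError).
def Pre_popcountDepth (n : Int) (k : Int) : Prop := k = 0 ∨ (k = 1 ∧ 0 ≤ n)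
instance (n : Int) (k : Int) : Decidable (Pre_popcountDepth n k) := by
  unfold Pre_popcountDepth; infer_instance

def pvWitness_popcountDepth : Int × Int := (5, 1)

def Spec_popcountDepth (n : Int) (k : Int) (out : Int) : Prop := out = popcountDepth_alt n k
instance (n : Int) (k : Int) (out : Int) : Decidable (Spec_popcountDepth n k out) := by
  unfold Spec_popcountDepth; infer_instance

-- ===== CLAIM (what is proved, stated in full; the proofs are below) =====
def Claim_equal_popcountDepth : Prop := ∀ (n : Int) (k : Int), Dom_popcountDepth n k → Pre_popcountDepth n k → Spec_popcountDepth n k (popcountDepth n k)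

-- ===== LEMMAS AND PROOFS =====

-- the scan is 0 once two ones have been seen (A = {1})
theorem pvScan_dead (s : List Bool) (ones t : Int) (h : 2 ≤ ones) :
    pvScan s [1] ones t = t - 1 := by
  induction s generalizing ones t with
  | nil =>
    simp only [pvScan, List.contains_cons, List.contains_nil]
    have h2 : (ones == (1:Int)) = false := beq_eq_false_iff_ne.mpr (by omega)
    simp [h2]
  | cons b tl ih =>
    cases b
    · simpa only [pvScan] using ih ones t h
    · simp only [pvScan]
      have hf : [(1:Int)].filter (fun a => decide (0 ≤ a - ones) && decide (a - ones ≤ ((tl.length:Nat) : Int))) = [] := by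
        rw [List.filter_eq_nil_iff]
        intro a ha
        simp only [List.mem_singleton] at ha
        subst ha
        simp only [Bool.and_eq_true, decide_eq_true_eq, not_and]
        intro h1; omega
      rw [hf]
      simpa using ih (ones + 1) _ (by omega)

-- unconstrained dfs (limit = false) with A = {1}, maxA = 1
theorem pvDfs_free (s : List Bool) (cnt : Int) (h : 0 ≤ cnt) :
    pvDfs s [1] 1 cnt false =
      if cnt = 0 then (s.length : Int) else if cnt = 1 then 1 else 0 := by
  induction s generalizing cnt with
  | nil =>
    simp only [pvDfs, List.contains_cons, List.contains_nil]
    by_cases h1 : cnt = 1 <;> simp [h1]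
  | cons b tl ih =>
    simp only [pvDfs, Bool.false_eq_true, ite_false]
    have hr : PySem.List.pyRange 0 (1 + 1) 1 = [0, 1] := by decide
    simp only [hr, List.foldl]
    rcases (by omega : cnt = 0 ∨ cnt = 1 ∨ 2 ≤ cnt) with h0 | h1 | h2
    · subst h0; simp [ih 0 le_rfl, ih 1 (by omega)]
    · subst h1; norm_num [ih 1 (by omega)]
    · have : ¬ cnt = 0 := by omega
      have : ¬ cnt = 1 := by omega
      split_ifs <;> omega

-- main loop invariant: the limited dfs equals the scan from the same state
theorem pvDfs_eq_scan (s : List Bool) (cnt t : Int) (h : 0 ≤ cnt) :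
    t + pvDfs s [1] 1 cnt true - (if ([(1:Int)]).contains 1 then 1 else 0) = pvScan s [1] cnt t := by
  induction s generalizing cnt t with
  | nil =>
    simp only [pvDfs, pvScan, List.contains_cons, List.contains_nil]
    by_cases h1 : cnt = 1 <;> simp [h1]
  | cons b tl ih =>
    cases b
    · -- bit 0: up = 0, only d = 0, limit stays true
      simp only [pvDfs, pvScan, ite_true, ite_false, Bool.false_eq_true]
      have hr : PySem.List.pyRange 0 (0 + 1) 1 = [0] := by decide
      simp only [hr, List.foldl]
      rcases (by omega : cnt ≤ 1 ∨ 2 ≤ cnt) with h1 | h2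
      · have hng : ¬ cnt + 0 > 1 := by omega
        simp only [if_neg hng, decide_true, Bool.and_true]
        simpa using ih cnt t h
      · simp only [if_pos (by omega : cnt + 0 > 1)]
        rw [pvScan_dead _ _ _ h2]; simp
    · -- bit 1: up = 1, d ∈ {0, 1}
      simp only [pvDfs, pvScan, ite_true]
      have hr : PySem.List.pyRange 0 (1 + 1) 1 = [0, 1] := by decide
      simp only [hr, List.foldl]
      rcases (by omega : cnt = 0 ∨ cnt = 1 ∨ 2 ≤ cnt) with h0 | h1 | h2
      · subst h0
        have hadd : (([(1:Int)].filter (fun a => decide (0 ≤ a - 0) && decide (a - 0 ≤ ((tl.length:Nat) : Int)))).map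
            (fun a => pvComb ((tl.length:Nat) : Int) (a - 0))).foldl (· + ·) 0 = ((tl.length:Nat) : Int) := by
          by_cases hl : (1:Int) ≤ ((tl.length:Nat) : Int)
          · have hfil : [(1:Int)].filter (fun a => decide (0 ≤ a - 0) && decide (a - 0 ≤ ((tl.length:Nat) : Int))) = [1] := by
              rw [List.filter_cons]; simp [hl]
            rw [hfil]
            have hc : pvComb ((tl.length:Nat) : Int) 1 = ((tl.length:Nat) : Int) := by
              have h1 : PySem.List.pyRange 0 1 1 = [0] := by decide
              simp [pvComb, h1, PySem.Int.floordiv, Int.fdiv_one]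
            simp [hc]
          · have hl0 : tl.length = 0 := by omega
            have hfil : [(1:Int)].filter (fun a => decide (0 ≤ a - 0) && decide (a - 0 ≤ ((tl.length:Nat) : Int))) = [] := by
              rw [List.filter_eq_nil_iff]
              intro a ha
              simp only [List.mem_singleton] at ha
              subst ha
              simp only [Bool.and_eq_true, decide_eq_true_eq, not_and]
              intro h1; omega
            rw [hfil, hl0]
            simp
        simp only [hadd]
        have hd0 : ¬ (0:Int) + 0 > 1 := by norm_num
        have hd1 : ¬ (0:Int) + 1 > 1 := by norm_num
        simp only [if_neg hd0, if_neg hd1]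
        have he0 : (true && decide ((0:Int) = 1)) = false := by decide
        have he1 : (true && decide ((1:Int) = 1)) = true := by decide
        simp only [he0]
        rw [pvDfs_free tl (0 + 0) le_rfl]
        rw [← ih (0 + 1) (t + ((tl.length:Nat) : Int)) (by omega)]
        simp only [List.contains_cons, List.contains_nil]
        norm_num
        ring
      · subst h1
        have hadd : (([(1:Int)].filter (fun a => decide (0 ≤ a - 1) && decide (a - 1 ≤ ((tl.length:Nat) : Int)))).map
            (fun a => pvComb ((tl.length:Nat) : Int) (a - 1))).foldl (· + ·) 0 = 1 := by
          have hfil : [(1:Int)].filter (fun a => decide (0 ≤ a - 1) && decide (a - 1 ≤ ((tl.length:Nat) : Int))) = [1] := by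
            rw [List.filter_cons]; simp
          rw [hfil]
          have hc : pvComb ((tl.length:Nat) : Int) 0 = 1 := by
            have h1 : PySem.List.pyRange 0 0 1 = [] := by decide
            simp [pvComb, h1]
          simp [hc]
        simp only [hadd]
        have hd0 : ¬ (1:Int) + 0 > 1 := by norm_num
        have hd1 : (1:Int) + 1 > 1 := by norm_num
        simp only [if_neg hd0, if_pos hd1]
        have he0 : (true && decide ((0:Int) = 1)) = false := by decide
        simp only [he0]
        rw [pvDfs_free tl (1 + 0) (by omega)]
        rw [pvScan_dead tl (1 + 1) (t + 1) (by omega)]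
        simp only [List.contains_cons, List.contains_nil]
        norm_num
      · have hd0 : cnt + 0 > 1 := by omega
        have hd1 : cnt + 1 > 1 := by omega
        simp only [if_pos hd0, if_pos hd1]
        have hfil : [(1:Int)].filter (fun a => decide (0 ≤ a - cnt) && decide (a - cnt ≤ ((tl.length:Nat) : Int))) = [] := by
          rw [List.filter_eq_nil_iff]
          intro a ha
          simp only [List.mem_singleton] at ha
          subst ha
          simp only [Bool.and_eq_true, decide_eq_true_eq, not_and]
          intro h1; omega
        rw [hfil]
        rw [pvScan_dead tl (cnt + 1) _ (by omega)]
        simp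

-- ===== VERDICT (by name: the statement is the Claim_ definition above) =====
theorem popcountDepth_spec : Claim_equal_popcountDepth := by
  intro n k _ hpre
  unfold Spec_popcountDepth popcountDepth popcountDepth_alt
  rcases hpre with h0 | ⟨h1, hn⟩
  · simp [h0]
  · subst h1
    have hk : ¬ (1:Int) = 0 := by norm_num
    simp only [if_neg hk]
    have hget : PySem.List.pyGet? pvS (1 - 1) = some [1] := by decide
    rw [hget]
    simp only []
    by_cases hle : (1 : Int) ≤ ((pvBin n).length : Int)
    · have hA : ([(1:Int)]).filter (fun x => decide (x ≤ ((pvBin n).length : Int))) = [1] := by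
        rw [List.filter_cons]; simp [hle]
      rw [hA]
      have hmax : (PySem.List.max? [(1:Int)] (fun x => x)).getD 0 = 1 := by decide
      rw [hmax]
      have hc1 : ([(1:Int)]).contains 1 = true := by decide
      have hne : ¬ ([(1:Int)] = ([] : List Int)) := by decide
      simp only [if_neg hne]
      have key := pvDfs_eq_scan (pvBin n) 0 0 le_rfl
      have hone : (if ([(1:Int)]).contains 1 = true then (1:Int) else 0) = 1 := by decide
      rw [hone] at key ⊢
      omega
    · have hA : ([(1:Int)]).filter (fun x => decide (x ≤ ((pvBin n).length : Int))) = [] := by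
        rw [List.filter_eq_nil_iff]
        intro a ha
        simp only [List.mem_singleton] at ha
        subst ha
        simp only [decide_eq_true_eq]
        omega
      rw [hA]
      simp
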